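-- pv_equiv track=rewrite | github.com/Ahsan-R-Kazmi/advent-of-code | 2021/day-19/day19.py | count_distance_matches
-- ===== SOURCE A (Python) =====
-- from typing import Tuple, List, Set, Dict
--
-- def count_distance_matches(dist_list_1: List[Tuple[int, Set[int], Tuple[int, int, int]]],
--                            dist_list_2: List[Tuple[int, Set[int], Tuple[int, int, int]]]) -> int:
--     matches = 0
--     for dist1 in dist_list_1:
--         for dist2 in dist_list_2:
--             if dist2[0] == dist1[0] and dist1[1] == dist2[1]:
--                 matches += 1
--
--     return matches
-- ===== SOURCE B (Python) =====
-- def count_distance_matches(dist_list_1, dist_list_2):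
--     # One pass over dist_list_2 builds a histogram keyed by (dist, frozenset);
--     # one pass over dist_list_1 sums the lookups.
--     counts = {}
--     for d in dist_list_2:
--         k = (d[0], frozenset(d[1]))
--         counts[k] = counts.get(k, 0) + 1
--     return sum(counts.get((d[0], frozenset(d[1])), 0) for d in dist_list_1)
-- ===== Notes on version B (the rewrite author's own statement) =====
-- stated objective: alternative
-- what changed: Replaces the nested pairwise scan (set comparison per pair) with a single histogram over dist_list_2 keyed by (dist, frozenset) followed by one lookup pass over dist_list_1.
import Mathlib
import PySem

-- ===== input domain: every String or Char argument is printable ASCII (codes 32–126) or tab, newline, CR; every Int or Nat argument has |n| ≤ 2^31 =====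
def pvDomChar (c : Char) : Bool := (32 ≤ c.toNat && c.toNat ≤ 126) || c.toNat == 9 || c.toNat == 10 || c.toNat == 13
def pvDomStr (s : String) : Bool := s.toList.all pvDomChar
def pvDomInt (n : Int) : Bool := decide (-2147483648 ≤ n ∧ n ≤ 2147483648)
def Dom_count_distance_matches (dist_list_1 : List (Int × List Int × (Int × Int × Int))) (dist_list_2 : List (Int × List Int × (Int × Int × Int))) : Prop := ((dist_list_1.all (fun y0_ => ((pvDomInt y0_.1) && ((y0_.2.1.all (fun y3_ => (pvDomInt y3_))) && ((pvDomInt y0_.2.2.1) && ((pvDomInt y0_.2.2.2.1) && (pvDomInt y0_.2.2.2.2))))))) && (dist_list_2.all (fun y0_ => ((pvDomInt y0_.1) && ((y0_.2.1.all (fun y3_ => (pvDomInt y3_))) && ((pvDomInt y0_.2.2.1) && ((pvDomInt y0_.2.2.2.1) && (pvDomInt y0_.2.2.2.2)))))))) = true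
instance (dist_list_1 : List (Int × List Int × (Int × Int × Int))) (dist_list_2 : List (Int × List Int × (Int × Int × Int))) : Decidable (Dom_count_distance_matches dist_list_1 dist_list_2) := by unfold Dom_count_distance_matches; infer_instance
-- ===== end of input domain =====

-- B replaces A's nested pairwise scan with a histogram of dist_list_2 keyed by (dist, frozenset) and one lookup pass over dist_list_1 (alternative algorithm).


-- ===== PORT A =====
def count_distance_matches (dist_list_1 : List (Int × List Int × (Int × Int × Int))) (dist_list_2 : List (Int × List Int × (Int × Int × Int))) : Int :=
  dist_list_1.foldl (fun m dist1 =>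
    dist_list_2.foldl (fun m dist2 =>
      if dist2.1 == dist1.1 && PySem.Set.equal dist1.2.1 dist2.2.1 then m + 1 else m)
      m) 0

-- ===== PORT B =====
-- frozenset(s) as a canonical hashable key: the strictly sorted list of s's distinct elements
def pvKey (x : Int × List Int × (Int × Int × Int)) : Int × List Int :=
  (x.1, PySem.List.sorted (PySem.Set.ofList x.2.1) (fun v => v) false)

def count_distance_matches_alt (dist_list_1 : List (Int × List Int × (Int × Int × Int))) (dist_list_2 : List (Int × List Int × (Int × Int × Int))) : Int :=
  let counts : PySem.Dict (Int × List Int) Int :=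
    dist_list_2.foldl (fun d x => d.modify (pvKey x) 0 (· + 1)) PySem.Dict.empty
  dist_list_1.foldl (fun s x => s + counts.getD (pvKey x) 0) 0

-- ===== PRECONDITION & SPEC =====
def Spec_count_distance_matches (dist_list_1 : List (Int × List Int × (Int × Int × Int))) (dist_list_2 : List (Int × List Int × (Int × Int × Int))) (out : Int) : Prop := out = count_distance_matches_alt dist_list_1 dist_list_2
instance (dist_list_1 : List (Int × List Int × (Int × Int × Int))) (dist_list_2 : List (Int × List Int × (Int × Int × Int))) (out : Int) : Decidable (Spec_count_distance_matches dist_list_1 dist_list_2 out) := by unfold Spec_count_distance_matches; infer_instance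

-- ===== CLAIM (what is proved, stated in full; the proofs are below) =====
def Claim_equal_count_distance_matches : Prop := ∀ (dist_list_1 : List (Int × List Int × (Int × Int × Int))) (dist_list_2 : List (Int × List Int × (Int × Int × Int))), Dom_count_distance_matches dist_list_1 dist_list_2 → Spec_count_distance_matches dist_list_1 dist_list_2 (count_distance_matches dist_list_1 dist_list_2)

-- ===== LEMMAS AND PROOFS =====

lemma key_eq_iff (s t : List Int) :
    PySem.Set.equal s t = true ↔
      PySem.List.sorted (PySem.Set.ofList s) (fun v => v) false
        = PySem.List.sorted (PySem.Set.ofList t) (fun v => v) false := by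
  rw [PySem.Set.equal_iff, PySem.List.sorted_id_eq_sorted_id_iff_perm,
      List.perm_ext_iff_of_nodup (PySem.Set.nodup_ofList s) (PySem.Set.nodup_ofList t)]
  simp [PySem.Set.mem_ofList]

lemma cond_eq (x y : Int × List Int × (Int × Int × Int)) :
    (y.1 == x.1 && PySem.Set.equal x.2.1 y.2.1) = (pvKey y == pvKey x) := by
  rw [Bool.eq_iff_iff]
  simp only [Bool.and_eq_true, beq_iff_eq, pvKey, Prod.mk.injEq]
  constructor
  · rintro ⟨h1, h2⟩; exact ⟨h1, ((key_eq_iff x.2.1 y.2.1).mp h2).symm⟩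
  · rintro ⟨h1, h2⟩; exact ⟨h1, (key_eq_iff x.2.1 y.2.1).mpr h2.symm⟩

lemma inner_count (x : Int × List Int × (Int × Int × Int))
    (l : List (Int × List Int × (Int × Int × Int))) (m : Int) :
    l.foldl (fun m dist2 =>
        if dist2.1 == x.1 && PySem.Set.equal x.2.1 dist2.2.1 then m + 1 else m) m
      = m + (l.countP (fun y => pvKey y == pvKey x) : Int) := by
  induction l generalizing m with
  | nil => simp
  | cons y l ih =>
    simp only [List.foldl_cons, List.countP_cons, cond_eq x y, ih]
    by_cases h : (pvKey y == pvKey x) = true <;> (simp [h]; try ring)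

lemma hist_getD (l : List (Int × List Int × (Int × Int × Int))) (k : Int × List Int) :
    (l.foldl (fun d x => d.modify (pvKey x) 0 (· + 1))
        (PySem.Dict.empty : PySem.Dict (Int × List Int) Int)).getD k 0
      = (l.countP (fun y => pvKey y == k) : Int) := by
  have hmap : ∀ (ll : List (Int × List Int × (Int × Int × Int)))
      (e : PySem.Dict (Int × List Int) Int),
      ll.foldl (fun d x => d.modify (pvKey x) 0 (· + 1)) e
        = (ll.map pvKey).foldl (fun d k => d.modify k 0 (· + 1)) e := by
    intro ll; induction ll with
    | nil => intro e; rfl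
    | cons z t ih => intro e; simp only [List.foldl_cons, List.map_cons]; exact ih _
  rw [hmap]
  rw [PySem.Dict.getD_foldl_modify_add_one]
  simp [List.count_eq_countP, List.countP_map]
  rfl

lemma outer_eq (l2 : List (Int × List Int × (Int × Int × Int)))
    (l1 : List (Int × List Int × (Int × Int × Int))) (a b : Int) (hab : a = b) :
    l1.foldl (fun m dist1 => l2.foldl (fun m dist2 =>
        if dist2.1 == dist1.1 && PySem.Set.equal dist1.2.1 dist2.2.1 then m + 1 else m) m) a
      = l1.foldl (fun s x =>
          s + (l2.foldl (fun d x => d.modify (pvKey x) 0 (· + 1))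
            (PySem.Dict.empty : PySem.Dict (Int × List Int) Int)).getD (pvKey x) 0) b := by
  induction l1 generalizing a b with
  | nil => simpa using hab
  | cons z l ih =>
    simp only [List.foldl_cons]
    exact ih _ _ (by rw [inner_count, hist_getD, hab])

-- ===== VERDICT (by name: the statement is the Claim_ definition above) =====
theorem count_distance_matches_spec : Claim_equal_count_distance_matches := by
  intro l1 l2 _
  unfold Spec_count_distance_matches count_distance_matches count_distance_matches_alt
  exact outer_eq l2 l1 0 0 rfl
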